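-- pv_equiv track=rewrite | github.com/zynoobb/algorithm | 백준/Silver/9996. 한국이 그리울 땐 서버에 접속하지/한국이 그리울 땐 서버에 접속하지.py | search
-- ===== SOURCE A (Python) =====
-- def search (_str, _compare) :
--   temp, index = '', -1
--   for i in range(len(_str)) :
--     if temp == _compare :
--       index = i
--       break
--     else :
--       temp += _str[i]
--
--   return index
-- ===== SOURCE B (Python) =====
-- def search(_str, _compare):
--     return len(_compare) if len(_compare) < len(_str) and _str.startswith(_compare) else -1
-- ===== Notes on version B (the rewrite author's own statement) =====
-- stated objective: idiomatic
-- what changed: Replaced the character-accumulation loop with a closed-form check: the loop returns len(_compare) exactly when _compare is a proper prefix of _str (strictly shorter), so B computes that directly with startswith.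
import Mathlib
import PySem

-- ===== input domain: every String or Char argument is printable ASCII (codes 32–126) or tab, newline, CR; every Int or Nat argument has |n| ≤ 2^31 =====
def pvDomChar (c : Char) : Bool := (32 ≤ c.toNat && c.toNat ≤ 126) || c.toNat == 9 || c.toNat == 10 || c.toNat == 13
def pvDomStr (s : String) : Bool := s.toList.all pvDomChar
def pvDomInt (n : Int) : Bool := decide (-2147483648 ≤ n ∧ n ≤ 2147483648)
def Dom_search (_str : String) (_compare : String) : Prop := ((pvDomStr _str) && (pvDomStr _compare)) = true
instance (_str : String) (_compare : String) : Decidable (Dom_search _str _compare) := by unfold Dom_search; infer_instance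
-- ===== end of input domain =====

-- B replaces A's character-accumulation loop by a closed-form proper-prefix check (idiomatic).


-- ===== PORT A =====
-- the for-loop over range(len(_str)): state is (temp, i); 'break' returns the index
def searchLoop (cs : List Char) (compare : List Char) (temp : List Char) (i : Nat) : Int :=
  match cs with
  | [] => -1
  | c :: rest => if temp = compare then (i : Int) else searchLoop rest compare (temp ++ [c]) (i + 1)

def search (_str : String) (_compare : String) : Int :=
  searchLoop _str.toList _compare.toList [] 0

-- ===== PORT B =====
def search_alt (_str : String) (_compare : String) : Int :=
  if _compare.toList.length < _str.toList.length ∧ _compare.toList.isPrefixOf _str.toList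
  then (_compare.toList.length : Int) else -1

-- ===== PRECONDITION & SPEC =====
def Spec_search (_str : String) (_compare : String) (out : Int) : Prop := out = search_alt _str _compare
instance (_str : String) (_compare : String) (out : Int) : Decidable (Spec_search _str _compare out) := by unfold Spec_search; infer_instance

-- ===== CLAIM (what is proved, stated in full; the proofs are below) =====
def Claim_equal_search : Prop := ∀ (_str : String) (_compare : String), Dom_search _str _compare → Spec_search _str _compare (search _str _compare)

-- ===== LEMMAS AND PROOFS =====

-- Loop characterisation: the break fires exactly when comp = temp ++ (first k chars of cs)
-- with k = comp.length - temp.length and strictly fewer than cs.length chars consumed.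
theorem searchLoop_eq (comp : List Char) :
    ∀ (cs temp : List Char) (i : Nat),
      searchLoop cs comp temp i =
        if temp.length ≤ comp.length ∧ comp.length - temp.length < cs.length ∧
           comp = temp ++ cs.take (comp.length - temp.length)
        then ((i + (comp.length - temp.length) : Nat) : Int) else -1 := by
  intro cs
  induction cs with
  | nil =>
      intro temp i
      simp [searchLoop]
  | cons c rest ih =>
      intro temp i
      simp only [searchLoop]
      by_cases h : temp = comp
      · subst h
        simp
      · rw [ih]
        by_cases hle : temp.length < comp.length
        · have hk : comp.length - temp.length = (comp.length - (temp ++ [c]).length) + 1 := by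
            simp; omega
          have hlen : (temp ++ [c]).length ≤ comp.length := by simp; omega
          rw [if_neg h]
          set k := comp.length - (temp ++ [c]).length with hkdef
          have htake : List.take (comp.length - temp.length) (c :: rest) = c :: List.take k rest := by
            rw [hk]; simp
          by_cases hc : k < rest.length ∧ comp = temp ++ [c] ++ List.take k rest
          · rw [if_pos ⟨hlen, hc.1, hc.2⟩, if_pos]
            · congr 1; omega
            · refine ⟨by omega, by simp; omega, ?_⟩
              rw [htake, hc.2]; simp
          · rw [if_neg (by tauto), if_neg]
            intro ⟨_, h2, h3⟩
            apply hc
            constructor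
            · simp at h2; omega
            · rw [h3, htake]; simp
        · -- temp.length ≥ comp.length and temp ≠ comp: both sides are -1
          rw [if_neg h, if_neg, if_neg]
          · intro ⟨h1, _, h3⟩
            have : temp.length = comp.length := by omega
            have : comp.length - temp.length = 0 := by omega
            simp [this] at h3
            exact h (h3.symm)
          · intro ⟨h1, _, _⟩
            simp at h1; omega

-- ===== VERDICT (by name: the statement is the Claim_ definition above) =====
theorem search_spec : Claim_equal_search := by
  intro s c _
  unfold Spec_search search search_alt
  rw [searchLoop_eq]
  by_cases hb : c.toList.length < s.toList.length ∧ c.toList.isPrefixOf s.toList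
  · rw [if_pos hb, if_pos]
    · simp
    · refine ⟨by simp, by simpa using hb.1, ?_⟩
      simp
      have := List.isPrefixOf_iff_prefix.mp hb.2
      exact (List.prefix_iff_eq_take.mp this)
  · rw [if_neg hb, if_neg]
    intro ⟨_, h2, h3⟩
    apply hb
    simp at h2 h3 ⊢
    refine ⟨h2, ?_⟩
    rw [h3]
    exact List.take_prefix _ _
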